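-- pv_equiv track=rewrite | github.com/LFelippeDev/python-exercises | pig-latin/pig_latin.py | has_a_y_after_consonant_cluster
-- ===== SOURCE A (Python) =====
-- def has_a_y_after_consonant_cluster(text):
--     """Return if the word has a y after a consonant cluster."""
--     if len(text) == 2 and text[1] == "y":
--         return True
--
--     consonant_sequence = 0
--     for letter in text:
--         if letter == "y" and consonant_sequence > 1:
--             return True
--         if letter in "aeiou":
--             consonant_sequence = 0
--         if letter not in "aeiouy":
--             consonant_sequence += 1
--     return False
-- ===== SOURCE B (Python) =====
-- def _has_late_y(seg):
--     """Does a 'y' occur in seg after at least two non-'y' characters?"""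
--     non_y = [i for i, ch in enumerate(seg) if ch != "y"]
--     return len(non_y) >= 2 and "y" in seg[non_y[1] + 1:]
--
--
-- def has_a_y_after_consonant_cluster(text):
--     """Return if the word has a y after a consonant cluster."""
--     if len(text) == 2 and text[1] == "y":
--         return True
--
--     segments = []
--     current = []
--     for ch in text:
--         if ch in "aeiou":
--             segments.append(current)
--             current = []
--         else:
--             current.append(ch)
--     segments.append(current)
--     return any(_has_late_y(seg) for seg in segments)
-- ===== Notes on version B (the rewrite author's own statement) =====
-- stated objective: alternative
-- what changed: A's single pass with a consonant counter reset at vowels is replaced by splitting the word into vowel-delimited segments and testing each segment for a 'y' occurring after its second non-'y' character (via the non-'y' index list and a slice membership test); the 2-char guard is kept.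
import Mathlib
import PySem

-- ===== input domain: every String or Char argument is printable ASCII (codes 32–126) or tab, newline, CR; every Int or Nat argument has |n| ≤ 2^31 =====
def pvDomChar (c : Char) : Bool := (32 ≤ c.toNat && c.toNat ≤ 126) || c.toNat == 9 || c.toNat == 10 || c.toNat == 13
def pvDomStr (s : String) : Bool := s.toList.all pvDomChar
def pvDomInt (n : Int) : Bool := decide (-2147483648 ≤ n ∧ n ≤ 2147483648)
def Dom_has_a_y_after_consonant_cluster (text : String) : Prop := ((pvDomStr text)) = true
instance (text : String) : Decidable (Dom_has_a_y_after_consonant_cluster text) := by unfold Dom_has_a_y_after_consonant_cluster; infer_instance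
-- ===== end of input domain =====

-- B replaces A's single-pass reset counter by splitting the word into vowel-delimited
-- segments and testing each segment for a 'y' after its 2nd non-'y' character (objective:
-- alternative decomposition, same cost).

-- ===== PORT A =====
-- the for-loop with early return, state = consonant_sequence
def pyLoopA : List Char → Int → Bool
  | [], _ => false
  | c :: rest, k =>
    if c = 'y' ∧ k > 1 then true
    else
      -- `letter in "aeiou"` / `letter not in "aeiouy"`: membership of one char, exact as list membership
      pyLoopA rest
        (if c ∉ ['a','e','i','o','u','y'] then (if c ∈ ['a','e','i','o','u'] then 0 else k) + 1
         else (if c ∈ ['a','e','i','o','u'] then 0 else k))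

def has_a_y_after_consonant_cluster (text : String) : Bool :=
  if text.toList.length = 2 ∧ text.toList[1]? = some 'y' then true   -- text[1] in range since len == 2
  else pyLoopA text.toList 0

-- ===== PORT B =====
-- _has_late_y: indices of non-'y' chars via enumerate, then `"y" in seg[non_y[1] + 1:]`
def hasLateY (seg : List Char) : Bool :=
  match (PySem.List.enumerate seg 0).filterMap (fun p => if p.2 ≠ 'y' then some p.1 else none) with
  | _ :: i :: _ => (PySem.List.slice seg (some (i + 1)) none).contains 'y'
  | _ => false   -- len(non_y) < 2: the `and` short-circuits to False

-- the segment-building loop: state = current segment; emits finished segments in order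
def splitVowels : List Char → List Char → List (List Char)
  | [], cur => [cur]
  | c :: rest, cur =>
    if c ∈ ['a','e','i','o','u'] then cur :: splitVowels rest []
    else splitVowels rest (cur ++ [c])

def has_a_y_after_consonant_cluster_alt (text : String) : Bool :=
  if text.toList.length = 2 ∧ text.toList[1]? = some 'y' then true
  else (splitVowels text.toList []).any hasLateY

-- ===== PRECONDITION & SPEC =====
def Spec_has_a_y_after_consonant_cluster (text : String) (out : Bool) : Prop := out = has_a_y_after_consonant_cluster_alt text
instance (text : String) (out : Bool) : Decidable (Spec_has_a_y_after_consonant_cluster text out) := by unfold Spec_has_a_y_after_consonant_cluster; infer_instance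

-- ===== CLAIM (what is proved, stated in full; the proofs are below) =====
def Claim_equal_has_a_y_after_consonant_cluster : Prop := ∀ (text : String), Dom_has_a_y_after_consonant_cluster text → Spec_has_a_y_after_consonant_cluster text (has_a_y_after_consonant_cluster text)

-- ===== LEMMAS AND PROOFS =====

-- proof-side name for the non-'y' index list hasLateY computes
def nY (seg : List Char) : List Int :=
  (PySem.List.enumerate seg 0).filterMap (fun p => if p.2 ≠ 'y' then some p.1 else none)

theorem hasLateY_eq (seg : List Char) :
    hasLateY seg = (match nY seg with
      | _ :: i :: _ => (PySem.List.slice seg (some (i + 1)) none).contains 'y'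
      | _ => false) := rfl

theorem nY_mem {seg : List Char} {i : Int} (h : i ∈ nY seg) :
    ∃ k : Nat, i = (k : Int) ∧ k < seg.length := by
  simp only [nY, List.mem_filterMap] at h
  obtain ⟨p, hp, hf⟩ := h
  rw [PySem.List.mem_enumerate_iff] at hp
  obtain ⟨k, hk, rfl⟩ := hp
  refine ⟨k, ?_, hk⟩
  by_cases hy : seg[k] ≠ 'y' <;> simp [hy] at hf
  omega

theorem nY_append (cur : List Char) (c : Char) :
    nY (cur ++ [c]) = nY cur ++ (if c ≠ 'y' then [(cur.length : Int)] else []) := by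
  simp only [nY, PySem.List.enumerate_append, List.filterMap_append,
    PySem.List.enumerate_cons, PySem.List.enumerate_nil]
  by_cases hy : c = 'y' <;> simp [hy]

theorem slice_cast (seg : List Char) (k : Nat) :
    PySem.List.slice seg (some ((k : Int) + 1)) none = seg.drop (k + 1) := by
  have : ((k : Int) + 1) = ((k + 1 : Nat) : Int) := by push_cast; ring
  rw [this, PySem.List.slice_from_natCast]

theorem hasLateY_short {seg : List Char} (h : (nY seg).length < 2) : hasLateY seg = false := by
  rw [hasLateY_eq]
  match hnm : nY seg with
  | [] => rfl
  | [_] => rfl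
  | _ :: _ :: _ => rw [hnm] at h; simp at h

-- appending a non-'y' char does not change the verdict
theorem hasLateY_append_nonY {cur : List Char} {c : Char} (hc : c ≠ 'y') :
    hasLateY (cur ++ [c]) = hasLateY cur := by
  rw [hasLateY_eq, hasLateY_eq, nY_append, if_pos hc]
  match hnm : nY cur with
  | [] => simp
  | [i] =>
      simp only [List.cons_append, List.nil_append]
      rw [slice_cast]
      have : (cur ++ [c]).drop (cur.length + 1) = [] := List.drop_eq_nil_of_le (by simp)
      simp [this]
  | i0 :: i1 :: rest =>
      have hi1 : i1 ∈ nY cur := by rw [hnm]; simp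
      obtain ⟨k, rfl, hk⟩ := nY_mem hi1
      simp only [List.cons_append]
      rw [slice_cast, slice_cast, List.drop_append_of_le_length (by omega)]
      simp [Ne.symm hc]

theorem hasLateY_append_y_long {cur : List Char} (h : 2 ≤ (nY cur).length) :
    hasLateY (cur ++ ['y']) = true := by
  rw [hasLateY_eq, nY_append]
  simp only [ne_eq, not_true_eq_false, if_false, List.append_nil]
  match hnm : nY cur with
  | [] => rw [hnm] at h; simp at h
  | [_] => rw [hnm] at h; simp at h
  | i0 :: i1 :: rest =>
      have hi1 : i1 ∈ nY cur := by rw [hnm]; simp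
      obtain ⟨k, rfl, hk⟩ := nY_mem hi1
      have hred : (match i0 :: ((k : Int)) :: rest with
        | _ :: i :: _ => (PySem.List.slice (cur ++ ['y']) (some (i + 1)) none).contains 'y'
        | _ => false) = (PySem.List.slice (cur ++ ['y']) (some ((k : Int) + 1)) none).contains 'y' := rfl
      rw [hred, slice_cast, List.drop_append_of_le_length (by omega)]
      simp

theorem hasLateY_mono {cur : List Char} (c : Char) (h : hasLateY cur = true) :
    hasLateY (cur ++ [c]) = true := by
  by_cases hc : c = 'y'
  · subst hc
    by_cases hl : 2 ≤ (nY cur).length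
    · exact hasLateY_append_y_long hl
    · rw [hasLateY_short (by omega)] at h; exact absurd h (by simp)
  · rw [hasLateY_append_nonY hc]; exact h

theorem splitVowels_any_of_late {l cur : List Char} (h : hasLateY cur = true) :
    (splitVowels l cur).any hasLateY = true := by
  induction l generalizing cur with
  | nil => simp [splitVowels, h]
  | cons c rest ih =>
      by_cases hv : c ∈ ['a','e','i','o','u']
      · simp [splitVowels, hv, h]
      · simp only [splitVowels, if_neg hv]
        exact ih (hasLateY_mono c h)

theorem main_loop (l : List Char) : ∀ (cur : List Char), hasLateY cur = false →
    pyLoopA l ((nY cur).length : Int) = (splitVowels l cur).any hasLateY := by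
  induction l with
  | nil => intro cur h; simp [pyLoopA, splitVowels, h]
  | cons c rest ih =>
      intro cur h
      simp only [pyLoopA, splitVowels]
      by_cases hv : c ∈ ['a','e','i','o','u']
      · have hcy : c ≠ 'y' := by intro hc; subst hc; simp at hv
        rw [if_neg (by tauto), if_neg (by simp at hv ⊢; tauto), if_pos hv, if_pos hv]
        have h0 : ((nY ([] : List Char)).length : Int) = 0 := by simp [nY, PySem.List.enumerate_nil]
        rw [show (0 : Int) = ((nY ([] : List Char)).length : Int) from h0.symm,
          ih [] (by decide)]
        simp [h]
      · by_cases hy : c = 'y'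
        · subst hy
          by_cases hk : ((nY cur).length : Int) > 1
          · rw [if_pos ⟨rfl, hk⟩, if_neg hv]
            exact (splitVowels_any_of_late (hasLateY_append_y_long (by omega))).symm
          · rw [if_neg (by tauto), if_neg (by simp), if_neg hv, if_neg hv]
            have hn : nY (cur ++ ['y']) = nY cur := by rw [nY_append]; simp
            have h' : hasLateY (cur ++ ['y']) = false := by
              apply hasLateY_short; rw [hn]; omega
            have := ih (cur ++ ['y']) h'
            rw [hn] at this
            exact this
        · have hcl : c ∉ ['a','e','i','o','u','y'] := by simp at hv ⊢; tauto
          rw [if_neg (by tauto), if_pos hcl, if_neg hv, if_neg hv]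
          have hn : (nY (cur ++ [c])).length = (nY cur).length + 1 := by
            rw [nY_append, if_pos hy]; simp
          have h' : hasLateY (cur ++ [c]) = false := by rw [hasLateY_append_nonY hy]; exact h
          have := ih (cur ++ [c]) h'
          rw [hn] at this
          push_cast at this ⊢
          exact this

theorem ports_agree (text : String) :
    has_a_y_after_consonant_cluster text = has_a_y_after_consonant_cluster_alt text := by
  unfold has_a_y_after_consonant_cluster has_a_y_after_consonant_cluster_alt
  by_cases h : text.toList.length = 2 ∧ text.toList[1]? = some 'y'
  · rw [if_pos h, if_pos h]
  · rw [if_neg h, if_neg h]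
    have := main_loop text.toList [] (by decide)
    simpa [nY, PySem.List.enumerate_nil] using this

-- ===== VERDICT (by name: the statement is the Claim_ definition above) =====
theorem has_a_y_after_consonant_cluster_spec : Claim_equal_has_a_y_after_consonant_cluster := by
  intro text _
  unfold Spec_has_a_y_after_consonant_cluster
  exact ports_agree text
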